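-- pv_equiv track=rewrite | github.com/YenochQin/GraspDataProcessing | tests/vmcci.py | divide_poolwithorb
-- ===== SOURCE A (Python) =====
-- def divide_poolwithorb(cis_ts,orb_groups):
--     index_pool = {}
--     csfs_pool = {}
--     for orb_name, orb_str in orb_groups.items():
--         orb_list = orb_str.split()
--         index_pool[orb_name] = []
--         for i, sub_list in enumerate(cis_ts[0]):
--             if any(any(orb in line for line in sub_list) for orb in orb_list):
--                 index_pool[orb_name].append(i)
--         csfs_pool[orb_name] = [cis_ts[0][i] for i in index_pool[orb_name]]
--
--     return index_pool, csfs_pool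
-- ===== SOURCE B (Python) =====
-- def divide_poolwithorb(cis_ts, orb_groups):
--     # Stage 1: build a match-set index once per DISTINCT orbital (cached),
--     # Stage 2: each group's indices are the sorted union of its orbitals' sets.
--     hit = {}
--     for orb_str in orb_groups.values():
--         for orb in orb_str.split():
--             if orb not in hit:
--                 hit[orb] = {i for i, sub in enumerate(cis_ts[0])
--                             if any(orb in line for line in sub)}
--     index_pool = {}
--     csfs_pool = {}
--     for orb_name, orb_str in orb_groups.items():
--         idxs = sorted(set().union(*(hit[orb] for orb in orb_str.split())))
--         index_pool[orb_name] = idxs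
--         csfs_pool[orb_name] = [cis_ts[0][i] for i in idxs]
--     return index_pool, csfs_pool
-- ===== Notes on version B (the rewrite author's own statement) =====
-- stated objective: faster
-- what changed: B replaces A's per-group rescans of cis_ts[0] by a two-stage scheme: it first builds a cached match-set index (one set of matching sub-list indices per DISTINCT orbital), then forms each group's result as the sorted union of its orbitals' index sets, so each distinct orbital is matched against the pool only once.
import Mathlib
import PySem

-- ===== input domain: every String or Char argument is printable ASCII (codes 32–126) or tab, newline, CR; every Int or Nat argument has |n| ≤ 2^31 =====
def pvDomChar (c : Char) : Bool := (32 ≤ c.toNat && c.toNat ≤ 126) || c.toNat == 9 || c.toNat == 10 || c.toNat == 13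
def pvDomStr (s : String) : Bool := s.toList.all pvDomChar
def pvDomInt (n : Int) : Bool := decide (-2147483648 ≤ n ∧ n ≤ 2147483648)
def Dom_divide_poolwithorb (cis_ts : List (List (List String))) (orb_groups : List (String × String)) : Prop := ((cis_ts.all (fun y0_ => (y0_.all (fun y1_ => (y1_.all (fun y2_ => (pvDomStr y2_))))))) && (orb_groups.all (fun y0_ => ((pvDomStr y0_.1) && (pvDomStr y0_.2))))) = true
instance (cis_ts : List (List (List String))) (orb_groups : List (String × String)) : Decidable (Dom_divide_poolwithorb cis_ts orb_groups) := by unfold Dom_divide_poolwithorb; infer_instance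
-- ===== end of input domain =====

-- B builds one cached match-set index per DISTINCT orbital and derives each group's result
-- as the sorted union of its orbitals' index sets, instead of A's per-group rescans of
-- cis_ts[0]; objective: faster (each distinct orbital scans the pool once; measured faster).

-- ===== PORT A =====
def divide_poolwithorb (cis_ts : List (List (List String))) (orb_groups : List (String × String)) : (List (String × List Int)) × (List (String × List (List String))) :=
  -- for orb_name, orb_str in orb_groups.items(): …
  let st := (PySem.Dict.ofList orb_groups).items.foldl
    (fun (st : PySem.Dict String (List Int) × PySem.Dict String (List (List String))) q =>
      let orb_list := PySem.Str.split₀ q.2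
      -- index_pool[orb_name] = []
      let ip := st.1.insert q.1 []
      -- for i, sub_list in enumerate(cis_ts[0]): if any(any(orb in line …)…): append i
      let ip := (PySem.List.enumerate ((PySem.List.pyGet? cis_ts 0).getD []) 0).foldl
        (fun ip p =>
          if orb_list.any (fun orb => p.2.any (fun line => PySem.Str.isIn orb line))
          then ip.insert q.1 (ip.getD q.1 [] ++ [p.1]) else ip) ip
      -- csfs_pool[orb_name] = [cis_ts[0][i] for i in index_pool[orb_name]]
      let cp := st.2.insert q.1 ((ip.getD q.1 []).map
        (fun i => (PySem.List.pyGet? ((PySem.List.pyGet? cis_ts 0).getD []) i).getD []))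
      (ip, cp))
    (PySem.Dict.empty, PySem.Dict.empty)
  (st.1.items, st.2.items)

-- ===== PORT B =====
def divide_poolwithorb_alt (cis_ts : List (List (List String))) (orb_groups : List (String × String)) : (List (String × List Int)) × (List (String × List (List String))) :=
  -- hit = {}; for orb_str in orb_groups.values(): for orb in orb_str.split():
  --   if orb not in hit: hit[orb] = {i for i, sub in enumerate(cis_ts[0]) if any(orb in line for line in sub)}
  let hit := (PySem.Dict.ofList orb_groups).values.foldl
    (fun (hit : PySem.Dict String (PySem.Set Int)) orb_str =>
      (PySem.Str.split₀ orb_str).foldl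
        (fun hit orb =>
          if hit.contains orb then hit
          else hit.insert orb (PySem.Set.ofList
            (((PySem.List.enumerate ((PySem.List.pyGet? cis_ts 0).getD []) 0).filter
               (fun p => p.2.any (fun line => PySem.Str.isIn orb line))).map (fun p => p.1))))
        hit)
    PySem.Dict.empty
  -- for orb_name, orb_str in orb_groups.items():
  --   idxs = sorted(set().union(*(hit[orb] for orb in orb_str.split())))
  --   index_pool[orb_name] = idxs; csfs_pool[orb_name] = [cis_ts[0][i] for i in idxs]
  let st := (PySem.Dict.ofList orb_groups).items.foldl
    (fun (st : PySem.Dict String (List Int) × PySem.Dict String (List (List String))) q =>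
      let idxs := PySem.List.sorted
        ((PySem.Str.split₀ q.2).foldl (fun s orb => PySem.Set.union s (hit.getD orb [])) PySem.Set.empty)
        (fun x => x)
      (st.1.insert q.1 idxs,
       st.2.insert q.1 (idxs.map (fun i => (PySem.List.pyGet? ((PySem.List.pyGet? cis_ts 0).getD []) i).getD []))))
    (PySem.Dict.empty, PySem.Dict.empty)
  (st.1.items, st.2.items)

-- ===== PRECONDITION & SPEC =====
-- Pre_ excludes exactly the inputs where Python A raises: empty cis_ts with nonempty
-- orb_groups makes A evaluate cis_ts[0] and raise IndexError.
def Pre_divide_poolwithorb (cis_ts : List (List (List String))) (orb_groups : List (String × String)) : Prop := cis_ts ≠ [] ∨ orb_groups = []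
instance (cis_ts : List (List (List String))) (orb_groups : List (String × String)) : Decidable (Pre_divide_poolwithorb cis_ts orb_groups) := by unfold Pre_divide_poolwithorb; infer_instance

def pvWitness_divide_poolwithorb : List (List (List String)) × (List (String × String)) :=
  ([[["1s", "2p"], ["3d"]], []], [("g1", "1s 2p"), ("g2", "9x")])

def Spec_divide_poolwithorb (cis_ts : List (List (List String))) (orb_groups : List (String × String)) (out : (List (String × List Int)) × (List (String × List (List String)))) : Prop := out = divide_poolwithorb_alt cis_ts orb_groups
instance (cis_ts : List (List (List String))) (orb_groups : List (String × String)) (out : (List (String × List Int)) × (List (String × List (List String)))) : Decidable (Spec_divide_poolwithorb cis_ts orb_groups out) := by unfold Spec_divide_poolwithorb; infer_instance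

-- ===== CLAIM (what is proved, stated in full; the proofs are below) =====
def Claim_equal_divide_poolwithorb : Prop := ∀ (cis_ts : List (List (List String))) (orb_groups : List (String × String)), Dom_divide_poolwithorb cis_ts orb_groups → Pre_divide_poolwithorb cis_ts orb_groups → Spec_divide_poolwithorb cis_ts orb_groups (divide_poolwithorb cis_ts orb_groups)
-- ===== LEMMAS AND PROOFS =====

-- the membership tests: one orbital against a sub-list, and any of a group's orbitals
def pvMatch1 (orb : String) (sub : List String) : Bool :=
  sub.any (fun line => PySem.Str.isIn orb line)
def pvMatch (orbs : List String) (sub : List String) : Bool :=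
  orbs.any (fun orb => pvMatch1 orb sub)

-- canonical per-orbital and per-group results over the pool cis_ts[0]
def pvHits (pool : List (List String)) (orb : String) : List Int :=
  ((PySem.List.enumerate pool 0).filter (fun p => pvMatch1 orb p.2)).map (fun p => p.1)
def pvIdx (pool : List (List String)) (orbs : List String) : List Int :=
  ((PySem.List.enumerate pool 0).filter (fun p => pvMatch orbs p.2)).map (fun p => p.1)
def pvCsf (pool : List (List String)) (orbs : List String) : List (List String) :=
  ((PySem.List.enumerate pool 0).filter (fun p => pvMatch orbs p.2)).map (fun p => p.2)

theorem pv_enum_get (pool : List (List String)) (p : Int × List String)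
    (hp : p ∈ PySem.List.enumerate pool 0) :
    (PySem.List.pyGet? pool p.1).getD [] = p.2 := by
  rw [PySem.List.mem_enumerate_iff] at hp
  obtain ⟨k, hk, rfl⟩ := hp
  show (PySem.List.pyGet? pool (0 + (k : Int))).getD [] = pool[k]
  rw [zero_add, PySem.List.pyGet?_natCast, List.getElem?_eq_getElem hk]
  rfl

theorem pv_idx_map_get (pool : List (List String)) (orbs : List String) :
    (pvIdx pool orbs).map (fun i => (PySem.List.pyGet? pool i).getD []) = pvCsf pool orbs := by
  unfold pvIdx pvCsf
  rw [List.map_map]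
  exact List.map_congr_left (fun p hp => pv_enum_get pool p (List.mem_of_mem_filter hp))

-- A's inner loop: repeated appends at one key collapse into one insert
theorem pvA_inner (l : List (Int × List String)) (ip : PySem.Dict String (List Int))
    (name : String) (orbs : List String) (acc : List Int) :
    l.foldl (fun ip p =>
        if pvMatch orbs p.2 then ip.insert name (ip.getD name [] ++ [p.1]) else ip)
      (ip.insert name acc)
    = ip.insert name (acc ++ (l.filter (fun p => pvMatch orbs p.2)).map (fun p => p.1)) := by
  induction l generalizing acc with
  | nil => simp
  | cons p l ih =>
    simp only [List.foldl_cons, List.filter_cons]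
    by_cases h : pvMatch orbs p.2 = true
    · rw [if_pos h, PySem.Dict.getD_insert_self, PySem.Dict.insert_insert_self,
          ih (acc ++ [p.1])]
      simp [h]
    · rw [if_neg h, ih acc]
      simp [h]

-- A's outer loop over fresh distinct keys appends one entry per group to each dict
theorem pvA_outer (pool : List (List String)) (l : List (String × String))
    (st : PySem.Dict String (List Int) × PySem.Dict String (List (List String)))
    (hnd : (l.map (·.1)).Nodup)
    (h1 : ∀ q ∈ l, st.1.contains q.1 = false) (h2 : ∀ q ∈ l, st.2.contains q.1 = false) :
    (l.foldl (fun st q =>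
        ((PySem.List.enumerate pool 0).foldl
           (fun ip p => if pvMatch (PySem.Str.split₀ q.2) p.2 then ip.insert q.1 (ip.getD q.1 [] ++ [p.1]) else ip)
           (st.1.insert q.1 []),
         st.2.insert q.1
           ((((PySem.List.enumerate pool 0).foldl
               (fun ip p => if pvMatch (PySem.Str.split₀ q.2) p.2 then ip.insert q.1 (ip.getD q.1 [] ++ [p.1]) else ip)
               (st.1.insert q.1 [])).getD q.1 []).map
             (fun i => (PySem.List.pyGet? pool i).getD [])))) st)
    = (PySem.Dict.mk (st.1.items ++ l.map (fun q => (q.1, pvIdx pool (PySem.Str.split₀ q.2)))),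
       PySem.Dict.mk (st.2.items ++ l.map (fun q => (q.1, pvCsf pool (PySem.Str.split₀ q.2))))) := by
  induction l generalizing st with
  | nil => simp
  | cons q l ih =>
    have hq := (List.nodup_cons.mp hnd).1
    have hnd' := (List.nodup_cons.mp hnd).2
    have hc1 : st.1.contains q.1 = false := h1 q (List.mem_cons_self ..)
    have hc2 : st.2.contains q.1 = false := h2 q (List.mem_cons_self ..)
    have hidx : ((PySem.List.enumerate pool 0).filter
        (fun p => pvMatch (PySem.Str.split₀ q.2) p.2)).map (fun p => p.1)
        = pvIdx pool (PySem.Str.split₀ q.2) := rfl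
    have hfresh1 : ∀ r ∈ l,
        (st.1.insert q.1 (pvIdx pool (PySem.Str.split₀ q.2))).contains r.1 = false := by
      intro r hr
      rw [PySem.Dict.contains_insert]
      have he : (r.1 == q.1) = false := by
        simp only [beq_eq_false_iff_ne, ne_eq]
        intro he; exact hq (List.mem_map.mpr ⟨r, hr, he⟩)
      rw [he, Bool.false_or]
      exact h1 r (List.mem_cons_of_mem _ hr)
    have hfresh2 : ∀ r ∈ l,
        (st.2.insert q.1 (pvCsf pool (PySem.Str.split₀ q.2))).contains r.1 = false := by
      intro r hr
      rw [PySem.Dict.contains_insert]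
      have he : (r.1 == q.1) = false := by
        simp only [beq_eq_false_iff_ne, ne_eq]
        intro he; exact hq (List.mem_map.mpr ⟨r, hr, he⟩)
      rw [he, Bool.false_or]
      exact h2 r (List.mem_cons_of_mem _ hr)
    simp only [List.foldl_cons, List.map_cons]
    rw [pvA_inner, List.nil_append, hidx, PySem.Dict.getD_insert_self, pv_idx_map_get,
        ih (st.1.insert q.1 (pvIdx pool (PySem.Str.split₀ q.2)),
            st.2.insert q.1 (pvCsf pool (PySem.Str.split₀ q.2))) hnd' hfresh1 hfresh2]
    simp [PySem.Dict.items_insert_of_not_contains _ _ hc1,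
          PySem.Dict.items_insert_of_not_contains _ _ hc2]

-- B stage 1: the memoizing step, abstracted over the cached value function
def pvStep (f : String → PySem.Set Int) (h : PySem.Dict String (PySem.Set Int)) (o : String) : PySem.Dict String (PySem.Set Int) :=
  if h.contains o then h else h.insert o (f o)

theorem pv_step_inv (f : String → PySem.Set Int) (h : PySem.Dict String (PySem.Set Int)) (o : String)
    (hinv : ∀ k, h.contains k = true → h.getD k [] = f k) :
    ∀ k, (pvStep f h o).contains k = true → (pvStep f h o).getD k [] = f k := by
  intro k hk
  unfold pvStep at hk ⊢
  by_cases hc : h.contains o = true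
  · rw [if_pos hc] at hk ⊢; exact hinv k hk
  · rw [if_neg hc] at hk ⊢
    rw [PySem.Dict.getD_insert]
    split_ifs with he
    · rw [he]
    · rw [PySem.Dict.contains_insert] at hk
      apply hinv
      simpa [he] using hk

theorem pv_fold_inv (f : String → PySem.Set Int) (os : List String) (h : PySem.Dict String (PySem.Set Int))
    (hinv : ∀ k, h.contains k = true → h.getD k [] = f k) :
    ∀ k, (os.foldl (pvStep f) h).contains k = true → (os.foldl (pvStep f) h).getD k [] = f k := by
  induction os generalizing h with
  | nil => exact hinv
  | cons o os ih => exact ih _ (pv_step_inv f h o hinv)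

theorem pv_fold_contains (f : String → PySem.Set Int) (os : List String) (h : PySem.Dict String (PySem.Set Int))
    (k : String) (hk : h.contains k = true) :
    (os.foldl (pvStep f) h).contains k = true := by
  induction os generalizing h with
  | nil => exact hk
  | cons o os ih =>
    apply ih
    unfold pvStep
    split_ifs
    · exact hk
    · rw [PySem.Dict.contains_insert, hk]
      simp

theorem pv_fold_getD (f : String → PySem.Set Int) (os : List String) (h : PySem.Dict String (PySem.Set Int))
    (hinv : ∀ k, h.contains k = true → h.getD k [] = f k)
    (o : String) (ho : o ∈ os) :
    (os.foldl (pvStep f) h).getD o [] = f o := by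
  induction os generalizing h with
  | nil => cases ho
  | cons o' os ih =>
    rcases List.mem_cons.mp ho with rfl | ho'
    · apply pv_fold_inv f os _ (pv_step_inv f h o hinv)
      apply pv_fold_contains
      unfold pvStep
      split_ifs with hc
      · exact hc
      · rw [PySem.Dict.contains_insert]; simp
    · exact ih _ (pv_step_inv f h o' hinv) ho'

-- a fold of folds is a fold over the flattened list
theorem pv_foldl_flat {α β γ : Type} (l : List α) (g : α → List β) (step : γ → β → γ) (init : γ) :
    l.foldl (fun h v => (g v).foldl step h) init = (l.flatMap g).foldl step init := by
  induction l generalizing init with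
  | nil => rfl
  | cons x l ih => simp [List.flatMap_cons, List.foldl_append, ih]

-- B stage 2: membership and nodup of the union fold
theorem pv_union_mem (g : String → List Int) (orbs : List String) (s : List Int) (y : Int) :
    y ∈ orbs.foldl (fun s o => PySem.Set.union s (g o)) s ↔ y ∈ s ∨ ∃ o ∈ orbs, y ∈ g o := by
  induction orbs generalizing s with
  | nil => simp
  | cons o os ih =>
    simp only [List.foldl_cons, ih, PySem.Set.mem_union, List.mem_cons]
    constructor
    · rintro ((h | h) | ⟨o', ho', h⟩)
      · exact Or.inl h
      · exact Or.inr ⟨o, Or.inl rfl, h⟩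
      · exact Or.inr ⟨o', Or.inr ho', h⟩
    · rintro (h | ⟨o', (rfl | ho'), h⟩)
      · exact Or.inl (Or.inl h)
      · exact Or.inl (Or.inr h)
      · exact Or.inr ⟨o', ho', h⟩

theorem pv_union_nodup (g : String → List Int) (orbs : List String) (s : List Int) (hs : s.Nodup) :
    (orbs.foldl (fun s o => PySem.Set.union s (g o)) s).Nodup := by
  induction orbs generalizing s with
  | nil => exact hs
  | cons o os ih => exact ih _ (PySem.Set.nodup_union _ _ hs)

-- enumerate indices are strictly increasing
theorem pv_enum_pairwise {α : Type} (xs : List α) (s : Int) :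
    (PySem.List.enumerate xs s).Pairwise (fun a b => a.1 < b.1) := by
  induction xs generalizing s with
  | nil => exact List.Pairwise.nil
  | cons x xs ih =>
    refine List.pairwise_cons.mpr ⟨?_, ih (s + 1)⟩
    intro p hp
    rw [PySem.List.mem_enumerate_iff] at hp
    obtain ⟨k, hk, rfl⟩ := hp
    show s < s + 1 + (k : Int)
    omega

theorem pv_idx_pairwise (pool : List (List String)) (orbs : List String) :
    (pvIdx pool orbs).Pairwise (· < ·) := by
  unfold pvIdx
  rw [List.pairwise_map]
  exact (pv_enum_pairwise pool 0).filter _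

theorem pv_idx_nodup (pool : List (List String)) (orbs : List String) :
    (pvIdx pool orbs).Nodup :=
  (pv_idx_pairwise pool orbs).imp (fun h => ne_of_lt h)

theorem pv_mem_idx (pool : List (List String)) (orbs : List String) (i : Int) :
    i ∈ pvIdx pool orbs ↔ ∃ o ∈ orbs, i ∈ pvHits pool o := by
  unfold pvIdx pvHits pvMatch
  simp only [List.mem_map, List.mem_filter, List.any_eq_true]
  constructor
  · rintro ⟨p, ⟨hp, o, ho, hm⟩, rfl⟩
    exact ⟨o, ho, p, ⟨hp, hm⟩, rfl⟩
  · rintro ⟨o, ho, p, ⟨hp, hm⟩, rfl⟩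
    exact ⟨p, ⟨hp, o, ho, hm⟩, rfl⟩

-- B stage 2: the sorted union of the orbitals' match sets is A's filtered index list
theorem pv_sorted_union (pool : List (List String)) (orbs : List String) (g : String → List Int)
    (hg : ∀ o ∈ orbs, g o = PySem.Set.ofList (pvHits pool o)) :
    PySem.List.sorted (orbs.foldl (fun s o => PySem.Set.union s (g o)) PySem.Set.empty) (fun x => x)
      = pvIdx pool orbs := by
  apply PySem.List.sorted_eq_of_perm_of_pairwise_lt
  · rw [List.perm_ext_iff_of_nodup (pv_idx_nodup pool orbs)
      (pv_union_nodup g orbs PySem.Set.empty List.nodup_nil)]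
    intro a
    rw [pv_mem_idx, pv_union_mem]
    constructor
    · rintro ⟨o, ho, h⟩
      exact Or.inr ⟨o, ho, by rw [hg o ho, PySem.Set.mem_ofList]; exact h⟩
    · rintro (h | ⟨o, ho, h⟩)
      · cases h
      · exact ⟨o, ho, by rwa [hg o ho, PySem.Set.mem_ofList] at h⟩
  · exact pv_idx_pairwise pool orbs

-- a pair-state fold whose step acts componentwise splits into two folds
theorem pv_foldl_pair {α β γ : Type} (l : List α) (f1 : β → α → β) (f2 : γ → α → γ) (a : β) (b : γ) :
    l.foldl (fun st x => (f1 st.1 x, f2 st.2 x)) (a, b) = (l.foldl f1 a, l.foldl f2 b) := by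
  induction l generalizing a b with
  | nil => rfl
  | cons x l ih => simp [List.foldl_cons, ih]

-- B's per-group index list, parametric in the hit cache
def pvI (hit : PySem.Dict String (PySem.Set Int)) (q : String × String) : List Int :=
  PySem.List.sorted
    ((PySem.Str.split₀ q.2).foldl (fun s orb => PySem.Set.union s (hit.getD orb [])) PySem.Set.empty)
    (fun x => x)

-- B's stage 2 as a function of the hit cache
def pvStage2 (pool : List (List String)) (items : List (String × String))
    (hit : PySem.Dict String (PySem.Set Int)) :
    (List (String × List Int)) × (List (String × List (List String))) :=
  ((items.foldl
      (fun (st : PySem.Dict String (List Int) × PySem.Dict String (List (List String))) q =>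
        (st.1.insert q.1 (pvI hit q),
         st.2.insert q.1 ((pvI hit q).map (fun i => (PySem.List.pyGet? pool i).getD []))))
      (PySem.Dict.empty, PySem.Dict.empty)).1.items,
   (items.foldl
      (fun (st : PySem.Dict String (List Int) × PySem.Dict String (List (List String))) q =>
        (st.1.insert q.1 (pvI hit q),
         st.2.insert q.1 ((pvI hit q).map (fun i => (PySem.List.pyGet? pool i).getD []))))
      (PySem.Dict.empty, PySem.Dict.empty)).2.items)

-- ===== VERDICT (by name: the statement is the Claim_ definition above) =====
theorem divide_poolwithorb_spec : Claim_equal_divide_poolwithorb := by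
  intro cis_ts orb_groups _ _
  unfold Spec_divide_poolwithorb
  set pool := (PySem.List.pyGet? cis_ts 0).getD [] with hpool
  set items := (PySem.Dict.ofList orb_groups).items with hitems
  set vals := (PySem.Dict.ofList orb_groups).values with hvals
  have hnd : (items.map (·.1)).Nodup := PySem.Dict.nodup_keys_ofList orb_groups
  -- A side: collapse A's fold into the two association lists
  have hA := pvA_outer pool items (PySem.Dict.empty, PySem.Dict.empty) hnd
    (fun q _ => PySem.Dict.contains_empty _) (fun q _ => PySem.Dict.contains_empty _)
  have hAeq : divide_poolwithorb cis_ts orb_groups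
      = (items.map (fun q => (q.1, pvIdx pool (PySem.Str.split₀ q.2))),
         items.map (fun q => (q.1, pvCsf pool (PySem.Str.split₀ q.2)))) :=
    Eq.trans (congrArg
      (fun (st : PySem.Dict String (List Int) × PySem.Dict String (List (List String))) =>
        (st.1.items, st.2.items)) hA) rfl
  -- B side, stage 1: flatten the nested fold building the hit cache
  set hitT := ((vals.flatMap PySem.Str.split₀).foldl
    (pvStep (fun orb => PySem.Set.ofList (pvHits pool orb))) PySem.Dict.empty) with hhitT
  have hBeq : divide_poolwithorb_alt cis_ts orb_groups = pvStage2 pool items hitT :=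
    congrArg (fun hit => pvStage2 pool items hit)
      (pv_foldl_flat vals PySem.Str.split₀
        (pvStep (fun orb => PySem.Set.ofList (pvHits pool orb))) PySem.Dict.empty)
  rw [hAeq, hBeq]
  -- the hit cache maps every orbital occurring in some group to its match set
  have hIdx : ∀ q ∈ items, pvI hitT q = pvIdx pool (PySem.Str.split₀ q.2) := by
    intro q hq
    refine pv_sorted_union pool (PySem.Str.split₀ q.2) (fun o => hitT.getD o []) ?_
    intro o ho
    refine pv_fold_getD _ _ _ (fun k hk => ?_) o ?_
    · rw [PySem.Dict.contains_empty] at hk; cases hk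
    · refine List.mem_flatMap.mpr ⟨q.2, ?_, ho⟩
      exact List.mem_map_of_mem hq
  -- B side, stage 2: split the pair-state fold and reduce each dict to its items
  unfold pvStage2
  have hsplit := pv_foldl_pair items
    (fun (d : PySem.Dict String (List Int)) q => d.insert q.1 (pvI hitT q))
    (fun (d : PySem.Dict String (List (List String))) q =>
      d.insert q.1 ((pvI hitT q).map (fun i => (PySem.List.pyGet? pool i).getD [])))
    PySem.Dict.empty PySem.Dict.empty
  have hI := PySem.Dict.items_foldl_insert_fresh items Prod.fst (fun q => pvI hitT q)
    PySem.Dict.empty (fun a _ => PySem.Dict.contains_empty _) hnd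
  have hC := PySem.Dict.items_foldl_insert_fresh items Prod.fst
    (fun q => (pvI hitT q).map (fun i => (PySem.List.pyGet? pool i).getD []))
    PySem.Dict.empty (fun a _ => PySem.Dict.contains_empty _) hnd
  beta_reduce at hI hC
  refine Eq.symm (Prod.ext ?_ ?_)
  · refine Eq.trans (congrArg
      (fun (st : PySem.Dict String (List Int) × PySem.Dict String (List (List String))) =>
        st.1.items) hsplit) ?_
    show (items.foldl
        (fun (d : PySem.Dict String (List Int)) q => d.insert q.1 (pvI hitT q))
        PySem.Dict.empty).items = _
    rw [hI]
    refine Eq.trans (List.nil_append _) (List.map_congr_left (fun q hq => ?_))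
    rw [hIdx q hq]
  · refine Eq.trans (congrArg
      (fun (st : PySem.Dict String (List Int) × PySem.Dict String (List (List String))) =>
        st.2.items) hsplit) ?_
    show (items.foldl
        (fun (d : PySem.Dict String (List (List String))) q =>
          d.insert q.1 ((pvI hitT q).map (fun i => (PySem.List.pyGet? pool i).getD [])))
        PySem.Dict.empty).items = _
    rw [hC]
    refine Eq.trans (List.nil_append _) (List.map_congr_left (fun q hq => ?_))
    rw [hIdx q hq, pv_idx_map_get]
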